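-- pv_equiv track=rewrite | github.com/pypi-data/pypi-mirror-403 | packages/agentpool/agentpool-2.8.8.tar.gz/agentpool-2.8.8/src/agentpool/docs/utils.py | _strip_docstring_sections
-- ===== SOURCE A (Python) =====
-- def _strip_docstring_sections(description: str) -> str:
--     """Strip Args/Returns/Raises sections from a docstring, keeping only the summary.
--
--     Args:
--         description: The full docstring
--
--     Returns:
--         Just the summary/description part without parameter documentation
--     """
--     lines = description.split("\n")
--     result = []
--     in_section = False
--
--     for line in lines:
--         stripped = line.strip()
--         # Check if we're entering a standard docstring section
--         if stripped in ("Args:", "Arguments:", "Returns:", "Raises:", "Yields:", "Note:"):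
--             in_section = True
--             continue
--         # Check if we're in a section (indented content after section header)
--         if in_section:
--             # If line is empty or still indented, skip it
--             if not stripped or line.startswith("    ") or line.startswith("\t"):
--                 continue
--             # Non-indented non-empty line means new content
--             in_section = False
--         result.append(line)
--
--     # Clean up trailing empty lines
--     while result and not result[-1].strip():
--         result.pop()
--
--     return "\n".join(result)
-- ===== SOURCE B (Python) =====
-- _SECTION_HEADERS = ("Args:", "Arguments:", "Returns:", "Raises:", "Yields:", "Note:")
--
--
-- def _strip_docstring_sections(description: str) -> str:
--     """Index-driven scan: an inner while-loop consumes each section body."""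
--     lines = description.split("\n")
--     n = len(lines)
--     result = []
--     i = 0
--     while i < n:
--         if lines[i].strip() in _SECTION_HEADERS:
--             i += 1
--             # consume the section body
--             while i < n:
--                 line = lines[i]
--                 if line.strip() in _SECTION_HEADERS:
--                     break  # outer loop re-handles the new header
--                 if not line.strip() or line.startswith("    ") or line.startswith("\t"):
--                     i += 1
--                     continue
--                 break  # non-indented non-empty line: re-handled by outer loop
--         else:
--             result.append(lines[i])
--             i += 1
--     while result and not result[-1].strip():
--         result.pop()
--     return "\n".join(result)
-- ===== Notes on version B (the rewrite author's own statement) =====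
-- stated objective: alternative
-- what changed: Replaced A's single for-loop with an in_section boolean flag by an index-driven outer while-loop plus a nested inner while-loop that consumes each section body and hands the boundary line back to the outer loop.
import Mathlib
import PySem

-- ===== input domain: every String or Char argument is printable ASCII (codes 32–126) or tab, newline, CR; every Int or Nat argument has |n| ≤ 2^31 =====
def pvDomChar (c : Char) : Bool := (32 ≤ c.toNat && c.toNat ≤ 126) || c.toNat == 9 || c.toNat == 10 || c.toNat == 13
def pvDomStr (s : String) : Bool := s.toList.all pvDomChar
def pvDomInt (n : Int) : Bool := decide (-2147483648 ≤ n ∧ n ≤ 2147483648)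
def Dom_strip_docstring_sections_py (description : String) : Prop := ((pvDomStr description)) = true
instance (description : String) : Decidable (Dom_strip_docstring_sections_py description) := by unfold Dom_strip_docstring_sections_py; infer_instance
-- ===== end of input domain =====

-- B replaces A's flag-based for-loop state machine by an index-driven scan with a nested
-- section-consuming loop (objective: alternative decomposition; same cost).

-- s.split("\n") (separator non-empty, so split? always returns some)
def pyLinesNL (s : String) : List String := (PySem.Str.split? s "\n").getD []

-- stripped in ("Args:", "Arguments:", "Returns:", "Raises:", "Yields:", "Note:")
def pvIsHeader (l : String) : Bool :=
  (["Args:", "Arguments:", "Returns:", "Raises:", "Yields:", "Note:"] : List String).contains (PySem.Str.strip l)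

-- not line.strip() or line.startswith("    ") or line.startswith("\t")
def pvIsBody (l : String) : Bool :=
  (PySem.Str.strip l == "") || PySem.Str.startswith l "    " || PySem.Str.startswith l "\t"

-- ===== PORT A =====
-- the for-loop over lines: the in_section flag and the result built in order
def pvALoop : List String → Bool → List String
  | [], _ => []
  | l :: ls, ins =>
    if pvIsHeader l then pvALoop ls true
    else if ins then
      if pvIsBody l then pvALoop ls true
      else l :: pvALoop ls false
    else l :: pvALoop ls false

-- 'while result and not result[-1].strip(): result.pop()' (drop trailing blank lines)
def pvATrim : List String → List String
  | [] => []
  | l :: ls =>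
    match pvATrim ls with
    | [] => if PySem.Str.strip l = "" then [] else [l]
    | r => l :: r

def strip_docstring_sections_py (description : String) : String :=
  PySem.Str.join "\n" (pvATrim (pvALoop (pyLinesNL description) false))

-- ===== PORT B =====
-- the inner while loop: consume the section body, stop (without consuming) at a new
-- header or at a non-indented non-empty line
def pvBSkip : List String → List String
  | [] => []
  | l :: ls =>
    if pvIsHeader l then l :: ls
    else if pvIsBody l then pvBSkip ls
    else l :: ls

lemma pvBSkip_length_le (ls : List String) : (pvBSkip ls).length ≤ ls.length := by
  induction ls with
  | nil => simp [pvBSkip]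
  | cons l ls ih =>
    simp only [pvBSkip]
    split_ifs <;> simp
    omega

-- the outer while loop over the line index
def pvBOuter : List String → List String
  | [] => []
  | l :: ls =>
    if pvIsHeader l then pvBOuter (pvBSkip ls)
    else l :: pvBOuter ls
termination_by ls => ls.length
decreasing_by
  · exact Nat.lt_succ_of_le (pvBSkip_length_le ls)
  · simp

-- trailing-blank trim, written over the reversed list
def pvBTrim (rs : List String) : List String :=
  (rs.reverse.dropWhile (fun l => PySem.Str.strip l == "")).reverse

def strip_docstring_sections_py_alt (description : String) : String :=
  PySem.Str.join "\n" (pvBTrim (pvBOuter (pyLinesNL description)))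

-- ===== PRECONDITION & SPEC =====
def Spec_strip_docstring_sections_py (description : String) (out : String) : Prop := out = strip_docstring_sections_py_alt description
instance (description : String) (out : String) : Decidable (Spec_strip_docstring_sections_py description out) := by unfold Spec_strip_docstring_sections_py; infer_instance

-- ===== CLAIM (what is proved, stated in full; the proofs are below) =====
def Claim_equal_strip_docstring_sections_py : Prop := ∀ (description : String), Dom_strip_docstring_sections_py description → Spec_strip_docstring_sections_py description (strip_docstring_sections_py description)

-- ===== LEMMAS AND PROOFS =====

-- A's flag-loop agrees with B's two nested loops (mutual statement, by strong induction on length)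
lemma pvLoop_key : ∀ n (ls : List String), ls.length ≤ n →
    pvALoop ls true = pvBOuter (pvBSkip ls) ∧ pvALoop ls false = pvBOuter ls := by
  intro n
  induction n with
  | zero =>
    intro ls h
    have : ls = [] := List.eq_nil_of_length_eq_zero (Nat.le_zero.mp h)
    subst this
    simp [pvALoop, pvBSkip, pvBOuter]
  | succ n ih =>
    intro ls h
    cases ls with
    | nil => simp [pvALoop, pvBSkip, pvBOuter]
    | cons l ls =>
      have hlen : ls.length ≤ n := by simpa using Nat.succ_le_succ_iff.mp (by simpa using h)
      obtain ⟨ih1, ih2⟩ := ih ls hlen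
      cases hh : pvIsHeader l
      · have eO : pvBOuter (l :: ls) = l :: pvBOuter ls := by
          rw [pvBOuter]; simp [hh]
        cases hb : pvIsBody l
        · exact ⟨by simp [pvALoop, pvBSkip, hh, hb, eO, ih2],
                 by simp [pvALoop, hh, eO, ih2]⟩
        · exact ⟨by simp [pvALoop, pvBSkip, hh, hb, ih1],
                 by simp [pvALoop, hh, eO, ih2]⟩
      · have eO : pvBOuter (l :: ls) = pvBOuter (pvBSkip ls) := by
          rw [pvBOuter]; simp [hh]
        exact ⟨by simp [pvALoop, pvBSkip, hh, eO, ih1],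
               by simp [pvALoop, hh, eO, ih1]⟩

-- the two renderings of the trailing-blank trim agree
lemma pvTrim_eq (rs : List String) : pvATrim rs = pvBTrim rs := by
  induction rs with
  | nil => simp [pvATrim, pvBTrim]
  | cons l ls ih =>
    rw [pvATrim, ih]
    unfold pvBTrim
    simp only [List.reverse_cons, List.dropWhile_append]
    by_cases h : (List.dropWhile (fun l => PySem.Str.strip l == "") ls.reverse) = []
    · by_cases hs : PySem.Str.strip l = ""
      · simp [h, List.dropWhile, hs]
      · have hb : (PySem.Str.strip l == "") = false := beq_eq_false_iff_ne.mpr hs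
        simp [h, List.dropWhile, hb, hs]
    · simp [h]

-- ===== VERDICT (by name: the statement is the Claim_ definition above) =====
theorem strip_docstring_sections_py_spec : Claim_equal_strip_docstring_sections_py := by
  intro description _
  unfold Spec_strip_docstring_sections_py strip_docstring_sections_py strip_docstring_sections_py_alt
  rw [pvTrim_eq, (pvLoop_key (pyLinesNL description).length _ le_rfl).2]
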